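-- pv_equiv track=rewrite | github.com/ATygah/MapLLM | llmDeploy/layer_mapper.py | _find_compact_shape
-- ===== SOURCE A (Python) =====
-- import math
--
-- def _find_compact_shape(num_pes, max_rows, max_cols):
--     """
--     Find the most compact rectangular shape that can fit all PEs.
--
--     Args:
--         num_pes: Number of PEs to fit
--         max_rows: Maximum number of rows available
--         max_cols: Maximum number of columns available
--
--     Returns:
--         Tuple of (height, width) for the most compact shape
--     """
--     # Start with a square-ish shape
--     best_perimeter = float('inf')
--     best_shape = (1, num_pes)  # Default to a 1-row configuration
--
--     # Try different heights and calculate corresponding widths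
--     for height in range(1, min(num_pes, max_rows) + 1):
--         width = math.ceil(num_pes / height)
--
--         # Skip if width exceeds the maximum columns
--         if width > max_cols:
--             continue
--
--         # Calculate perimeter (lower is more compact)
--         perimeter = 2 * (height + width)
--
--         # Update best shape if this one has a smaller perimeter
--         if perimeter < best_perimeter:
--             best_perimeter = perimeter
--             best_shape = (height, width)
--
--     return best_shape
-- ===== SOURCE B (Python) =====
-- import math
--
-- def _find_compact_shape(num_pes, max_rows, max_cols):
--     # Divisor-block enumeration: ceil(num_pes/h) takes O(sqrt(num_pes)) distinct
--     # values; within a block of heights sharing the same width, only the smallest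
--     # height can improve the perimeter, so we visit one height per block.
--     H = min(num_pes, max_rows)
--     best_per = None
--     best = (1, num_pes)
--     h = 1
--     while h <= H:
--         w = -(-num_pes // h)  # ceil(num_pes / h); num_pes >= h >= 1 here
--         # last height with the same width w
--         h_end = H if w <= 1 else min((num_pes - 1) // (w - 1), H)
--         if w <= max_cols:
--             per = 2 * (h + w)
--             if best_per is None or per < best_per:
--                 best_per = per
--                 best = (h, w)
--         h = max(h_end, h) + 1
--     return best
-- ===== Notes on version B (the rewrite author's own statement) =====
-- stated objective: faster
-- what changed: Replaced the linear scan over every height 1..min(num_pes,max_rows) by divisor-block enumeration: ceil(num_pes/h) takes O(sqrt(num_pes)) distinct values, and within each block of heights sharing a width only the smallest height can improve the perimeter, so B visits one height per block.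
import Mathlib
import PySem

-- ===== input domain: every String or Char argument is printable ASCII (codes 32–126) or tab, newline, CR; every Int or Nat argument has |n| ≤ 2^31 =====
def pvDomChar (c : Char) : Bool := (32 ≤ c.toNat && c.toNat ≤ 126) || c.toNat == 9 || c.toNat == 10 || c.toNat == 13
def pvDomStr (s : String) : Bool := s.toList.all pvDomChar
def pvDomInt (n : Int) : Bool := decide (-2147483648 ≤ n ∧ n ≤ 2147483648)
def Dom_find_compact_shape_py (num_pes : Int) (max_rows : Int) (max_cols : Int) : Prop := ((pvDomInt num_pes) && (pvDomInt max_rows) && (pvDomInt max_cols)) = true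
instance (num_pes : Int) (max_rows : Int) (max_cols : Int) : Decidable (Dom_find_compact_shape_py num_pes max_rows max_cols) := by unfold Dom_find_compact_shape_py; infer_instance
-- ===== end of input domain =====

-- B replaces A's linear scan over all heights by divisor-block enumeration
-- (one candidate height per distinct width value); objective: faster.

-- ===== PORT A =====
-- Loop body of A. State = (best_perimeter : Option Int (none = float('inf')), best_shape).
-- math.ceil(num_pes/height) is the exact integer ceiling on Dom (|num_pes| ≤ 2^31 < 2^53),
-- ported as -((-num_pes) // height).
def pvStepA (num_pes : Int) (max_cols : Int) (st : Option Int × List Int) (height : Int) : Option Int × List Int :=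
  let width := -(PySem.Int.floordiv (-num_pes) height)
  if width > max_cols then st
  else
    let perimeter := 2 * (height + width)
    if (match st.1 with | none => true | some bp => decide (perimeter < bp)) then
      (some perimeter, [height, width])
    else st

def find_compact_shape_py (num_pes : Int) (max_rows : Int) (max_cols : Int) : List Int :=
  ((PySem.List.pyRange 1 (min num_pes max_rows + 1) 1).foldl
    (pvStepA num_pes max_cols) (none, [1, num_pes])).2

-- ===== PORT B =====
-- While-loop of B: jump from each block of heights sharing the same width to the next.
def pvAltLoop (num_pes : Int) (max_cols : Int) (H : Int) (h : Int) (st : Option Int × List Int) : Option Int × List Int :=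
  if hc : h ≤ H then
    let w := -(PySem.Int.floordiv (-num_pes) h)
    let h_end := if w ≤ 1 then H else min (PySem.Int.floordiv (num_pes - 1) (w - 1)) H
    let st' :=
      if w ≤ max_cols then
        let per := 2 * (h + w)
        if (match st.1 with | none => true | some bp => decide (per < bp)) then
          (some per, [h, w])
        else st
      else st
    pvAltLoop num_pes max_cols H (max h_end h + 1) st'
  else st
termination_by (H + 1 - h).toNat
decreasing_by
  have := le_max_right h_end h
  omega

def find_compact_shape_py_alt (num_pes : Int) (max_rows : Int) (max_cols : Int) : List Int :=
  (pvAltLoop num_pes max_cols (min num_pes max_rows) 1 (none, [1, num_pes])).2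

-- ===== PRECONDITION & SPEC =====
def Spec_find_compact_shape_py (num_pes : Int) (max_rows : Int) (max_cols : Int) (out : List Int) : Prop := out = find_compact_shape_py_alt num_pes max_rows max_cols
instance (num_pes : Int) (max_rows : Int) (max_cols : Int) (out : List Int) : Decidable (Spec_find_compact_shape_py num_pes max_rows max_cols out) := by unfold Spec_find_compact_shape_py; infer_instance

-- ===== CLAIM (what is proved, stated in full; the proofs are below) =====
def Claim_equal_find_compact_shape_py : Prop := ∀ (num_pes : Int) (max_rows : Int) (max_cols : Int), Dom_find_compact_shape_py num_pes max_rows max_cols → Spec_find_compact_shape_py num_pes max_rows max_cols (find_compact_shape_py num_pes max_rows max_cols)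

-- ===== LEMMAS AND PROOFS =====

-- Folding a function that fixes the state is the identity.
theorem pv_foldl_noop {α β : Type} (f : α → β → α) (a : α) (l : List β)
    (h : ∀ x ∈ l, f a x = a) : l.foldl f a = a := by
  induction l with
  | nil => rfl
  | cons x xs ih =>
    simp only [List.foldl_cons, h x (List.mem_cons_self)]
    exact ih (fun y hy => h y (List.mem_cons_of_mem x hy))

-- Ceiling division bounds: for 0 < h, w := ⌈n/h⌉ satisfies (w-1)h < n ≤ wh.
theorem pv_ceil_bounds (n h : Int) (hh : 0 < h) :
    (-(PySem.Int.floordiv (-n) h) - 1) * h < n ∧ n ≤ -(PySem.Int.floordiv (-n) h) * h :=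
  (PySem.Int.neg_floordiv_neg_eq_iff_of_pos hh).mp rfl

-- Within a block [h, h_end] every height has the same width.
theorem pv_block_const (n h h' : Int) (h1 : 1 ≤ h) (hn : h ≤ n) (hle : h ≤ h')
    (hub : h' ≤ (if -(PySem.Int.floordiv (-n) h) ≤ 1 then h'
                 else PySem.Int.floordiv (n - 1) (-(PySem.Int.floordiv (-n) h) - 1))) :
    -(PySem.Int.floordiv (-n) h') = -(PySem.Int.floordiv (-n) h) := by
  set w := -(PySem.Int.floordiv (-n) h) with hw
  have hb := pv_ceil_bounds n h (by omega)
  have hw1 : 1 ≤ w := by nlinarith [hb.2]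
  have hh' : 0 < h' := by omega
  rw [PySem.Int.neg_floordiv_neg_eq_iff_of_pos hh']
  constructor
  · by_cases hcase : w ≤ 1
    · have : w = 1 := le_antisymm hcase hw1
      rw [this]; simpa using (by omega : (0:Int) < n)
    · simp only [if_neg hcase] at hub
      have := (PySem.Int.le_floordiv_iff_mul_le (by omega : (0:Int) < w - 1)).mp hub
      nlinarith
  · nlinarith [hb.2]

-- Main loop correspondence: B's block loop computes A's fold over the remaining range.
-- Main loop correspondence: B's block loop computes A's fold over the remaining range.
theorem pv_loop_eq (n maxc H : Int) (hH : H ≤ n) :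
    ∀ (k : Nat) (h : Int) (st : Option Int × List Int), 1 ≤ h → (H + 1 - h).toNat = k →
    pvAltLoop n maxc H h st =
      (PySem.List.pyRange h (H + 1) 1).foldl (pvStepA n maxc) st := by
  intro k
  induction k using Nat.strong_induction_on with
  | _ k IH =>
  intro h st h1 hk
  rw [pvAltLoop]
  by_cases hc : h ≤ H
  · simp only [dif_pos hc]
    set w := -(PySem.Int.floordiv (-n) h) with hwdef
    set h_end := if w ≤ 1 then H else min (PySem.Int.floordiv (n - 1) (w - 1)) H with hedef
    have hn : h ≤ n := le_trans hc hH
    have hb := pv_ceil_bounds n h (by omega)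
    rw [← hwdef] at hb
    have hw1 : 1 ≤ w := by nlinarith [hb.2]
    have hendH : h_end ≤ H := by
      rw [hedef]; split
      · exact le_refl H
      · exact min_le_right _ _
    have hhend : h ≤ h_end := by
      rw [hedef]; split
      · exact hc
      · next hcase =>
        refine le_min ?_ hc
        rw [PySem.Int.le_floordiv_iff_mul_le (by omega : (0:Int) < w - 1)]
        nlinarith [hb.1]
    have hmax : max h_end h = h_end := max_eq_left hhend
    have hconst : ∀ h', h ≤ h' → h' ≤ h_end → -(PySem.Int.floordiv (-n) h') = w := by
      intro h' hge hle'
      refine pv_block_const n h h' h1 hn hge ?_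
      rw [← hwdef]
      by_cases hcase : w ≤ 1
      · simp [hcase]
      · simp only [if_neg hcase]
        have : h_end ≤ PySem.Int.floordiv (n - 1) (w - 1) := by
          rw [hedef, if_neg hcase]; exact min_le_left _ _
        omega
    set st2 := pvStepA n maxc st h with hst2
    have hstepA : st2 =
        (if w ≤ maxc then
          if (match st.1 with | none => true | some bp => decide (2 * (h + w) < bp)) then
            (some (2 * (h + w)), [h, w])
          else st
        else st) := by
      rw [hst2]
      simp only [pvStepA, ← hwdef]
      by_cases hcm : w ≤ maxc
      · simp [hcm, not_lt.mpr hcm]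
      · simp [hcm, lt_of_not_ge hcm]
    rw [PySem.List.pyRange_one_append h (h_end + 1) (H + 1) (by omega) (by omega),
        List.foldl_append,
        PySem.List.pyRange_one_cons (by omega : h < h_end + 1),
        List.foldl_cons, ← hst2]
    by_cases hcm : w ≤ maxc
    · rw [if_pos hcm] at hstepA
      rw [if_pos hcm]
      have hex : ∃ p, st2.1 = some p ∧ p ≤ 2 * (h + w) := by
        rcases hst : st.1 with _ | bp
        · rw [hst] at hstepA
          simp only [] at hstepA
          exact ⟨2 * (h + w), by rw [hstepA]; simp, le_refl _⟩
        · rw [hst] at hstepA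
          by_cases hlt : 2 * (h + w) < bp
          · simp only [decide_eq_true hlt, if_pos] at hstepA
            exact ⟨2 * (h + w), by rw [hstepA], le_refl _⟩
          · simp only [decide_eq_false hlt, Bool.false_eq_true, if_false] at hstepA
            exact ⟨bp, by rw [hstepA]; exact hst, by omega⟩
      obtain ⟨p, hp1, hp2⟩ := hex
      have hnoop : (PySem.List.pyRange (h + 1) (h_end + 1) 1).foldl (pvStepA n maxc) st2
          = st2 := by
        apply pv_foldl_noop
        intro x hx
        rw [PySem.List.mem_pyRange_one] at hx
        have hwx : -(PySem.Int.floordiv (-n) x) = w := hconst x (by omega) (by omega)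
        simp [pvStepA, hwx, hp1, not_lt.mpr hcm, show ¬ (2 * (x + w) < p) from by omega]
      rw [hnoop, ← hstepA, hmax]
      exact IH (H + 1 - (h_end + 1)).toNat (by omega) (h_end + 1) st2 (by omega) rfl
    · rw [if_neg hcm] at hstepA
      rw [if_neg hcm]
      have hnoop : (PySem.List.pyRange (h + 1) (h_end + 1) 1).foldl (pvStepA n maxc) st2
          = st2 := by
        apply pv_foldl_noop
        intro x hx
        rw [PySem.List.mem_pyRange_one] at hx
        have hwx : -(PySem.Int.floordiv (-n) x) = w := hconst x (by omega) (by omega)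
        simp [pvStepA, hwx, lt_of_not_ge hcm]
      rw [hnoop, hstepA, hmax]
      exact IH (H + 1 - (h_end + 1)).toNat (by omega) (h_end + 1) st (by omega) rfl
  · simp only [dif_neg hc]
    rw [PySem.List.pyRange_one_eq_nil (by omega : H + 1 ≤ h)]
    rfl

-- ===== VERDICT (by name: the statement is the Claim_ definition above) =====
theorem find_compact_shape_py_spec : Claim_equal_find_compact_shape_py := by
  intro num_pes max_rows max_cols _
  unfold Spec_find_compact_shape_py find_compact_shape_py find_compact_shape_py_alt
  rw [pv_loop_eq num_pes max_cols (min num_pes max_rows) (min_le_left _ _) _ 1 _ (le_refl 1) rfl]
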